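-- pv_equiv track=rewrite | github.com/haZuny/Algorithm_Study | 프로그래머스/2/148652. 유사 칸토어 비트열/유사 칸토어 비트열.py | getCntUntilIdx
-- ===== SOURCE A (Python) =====
-- def getCntUntilIdx(idx, n, dp):
--         if n < 0: return 0;
--         if n == 0: return 1;
--         if n == 1:
--             if idx == 0: return 1;
--             if idx == 1: return 2;
--             if idx == 2: return 2;
--             if idx == 3: return 3;
--             if idx == 4: return 4;
--
--         # 몫과 나머지 계산
--         div = idx//(5**(n-1))
--         remain = idx%(5**(n-1))
--         # 00000 기준으로 케이스를 나눠서, 재귀적으로 개수를 구함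
--         if div < 2:
--             return dp[n-1]*div + getCntUntilIdx(remain, n-1, dp)
--         elif div == 2:
--             return dp[n-1]*div
--         else:
--             return dp[n-1]*(div-1) + getCntUntilIdx(remain, n-1, dp)
-- ===== SOURCE B (Python) =====
-- def getCntUntilIdx(idx, n, dp):
--     if n < 0:
--         return 0
--     if n == 0:
--         return 1
--     result = 0
--     while n > 1:
--         div, idx = divmod(idx, 5 ** (n - 1))
--         b = dp[n - 1]
--         if div == 2:
--             return result + 2 * b
--         result += b * (div if div < 2 else div - 1)
--         n -= 1
--     return result + (1, 2, 2, 3, 4)[idx]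
-- ===== Notes on version B (the rewrite author's own statement) =====
-- stated objective: alternative
-- what changed: Replaces A's recursion with an explicit iterative loop over base-5 levels that carries an additive accumulator, computes quotient/remainder with one divmod, merges the div<2 and div>2 branches into a single arithmetic update, and replaces the five hardcoded n==1 equality branches by a lookup table.
-- outside the precondition, e.g. on getCntUntilIdx(7, 1, [3]): A returns 19, B raises IndexError
import Mathlib
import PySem

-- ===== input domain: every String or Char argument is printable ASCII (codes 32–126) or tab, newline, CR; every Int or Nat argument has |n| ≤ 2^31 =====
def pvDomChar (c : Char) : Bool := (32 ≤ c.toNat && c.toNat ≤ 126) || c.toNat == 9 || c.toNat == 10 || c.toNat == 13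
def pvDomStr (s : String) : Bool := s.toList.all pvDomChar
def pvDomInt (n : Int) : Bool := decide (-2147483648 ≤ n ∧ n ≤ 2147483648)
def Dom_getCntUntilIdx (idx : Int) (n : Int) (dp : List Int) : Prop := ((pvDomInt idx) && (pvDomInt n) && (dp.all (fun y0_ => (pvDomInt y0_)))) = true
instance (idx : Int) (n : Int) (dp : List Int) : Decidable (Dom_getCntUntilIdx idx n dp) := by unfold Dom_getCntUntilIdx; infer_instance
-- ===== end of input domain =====

-- ===== PORT A =====
-- B rewrites A's recursion as an explicit accumulator loop over base-5 levels (alternative decomposition, same cost).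
-- Both ports use a structural fuel argument (n.toNat + 1) solely as a totality guard: each recursive call
-- decreases n by exactly 1 from n >= 1, so the fuel-0 branch is never reached.
def getCntUntilIdxF : Nat → Int → Int → List Int → Int
  | 0, _, _, _ => 0  -- unreachable: fuel n.toNat + 1 never runs out
  | f + 1, idx, n, dp =>
    if n < 0 then 0
    else if n = 0 then 1
    else if n = 1 ∧ idx = 0 then 1
    else if n = 1 ∧ idx = 1 then 2
    else if n = 1 ∧ idx = 2 then 2
    else if n = 1 ∧ idx = 3 then 3
    else if n = 1 ∧ idx = 4 then 4
    else
      let div := PySem.Int.floordiv idx (5 ^ (n - 1).toNat)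
      let remain := PySem.Int.mod idx (5 ^ (n - 1).toNat)
      -- dp[n-1]: n-1 >= 0 here; the IndexError case (n-1 >= dp.length) is excluded by Pre_
      let d := (PySem.List.pyGet? dp (n - 1)).getD 0
      if div < 2 then d * div + getCntUntilIdxF f remain (n - 1) dp
      else if div = 2 then d * div
      else d * (div - 1) + getCntUntilIdxF f remain (n - 1) dp

def getCntUntilIdx (idx : Int) (n : Int) (dp : List Int) : Int :=
  getCntUntilIdxF (n.toNat + 1) idx n dp

-- ===== PORT B =====
-- the while-loop of Source B: state (idx, n, result); returns on div == 2 or when n reaches 1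
def cantorLoopF : Nat → Int → Int → List Int → Int → Int
  | 0, _, _, _, result => result  -- unreachable: fuel n.toNat + 1 never runs out
  | f + 1, idx, n, dp, result =>
    if n > 1 then
      let div := PySem.Int.floordiv idx (5 ^ (n - 1).toNat)
      let idx' := PySem.Int.mod idx (5 ^ (n - 1).toNat)
      -- dp[n-1]: IndexError excluded by Pre_
      let b := (PySem.List.pyGet? dp (n - 1)).getD 0
      if div = 2 then result + 2 * b
      else cantorLoopF f idx' (n - 1) dp (result + b * (if div < 2 then div else div - 1))
    else
      -- (1,2,2,3,4)[idx]: tuple IndexError excluded by Pre_ (pyGet? wraps negative idx exactly like Python)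
      result + (PySem.List.pyGet? [1, 2, 2, 3, 4] idx).getD 0

def getCntUntilIdx_alt (idx : Int) (n : Int) (dp : List Int) : Int :=
  if n < 0 then 0
  else if n = 0 then 1
  else cantorLoopF (n.toNat + 1) idx n dp 0

-- ===== PRECONDITION & SPEC =====
-- Pre_ excludes (a) inputs where A raises IndexError (n >= 2 with dp shorter than n, or n = 1 with
-- idx outside 0..4 and dp empty), and (b) n = 1 with idx outside 0..4 and dp nonempty, where A falls
-- through its hardcoded level-1 table (whose bitstring has only indices 0..4) and returns an
-- accidental dp[0]-based value; B naturally raises there.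
def Pre_getCntUntilIdx (idx : Int) (n : Int) (dp : List Int) : Prop :=
  n ≤ 0 ∨ (n = 1 ∧ 0 ≤ idx ∧ idx ≤ 4) ∨ (2 ≤ n ∧ n ≤ (dp.length : Int))
instance (idx : Int) (n : Int) (dp : List Int) : Decidable (Pre_getCntUntilIdx idx n dp) := by unfold Pre_getCntUntilIdx; infer_instance

def pvWitness_getCntUntilIdx : Int × Int × List Int := (61, 3, [1, 3, 11])

def Spec_getCntUntilIdx (idx : Int) (n : Int) (dp : List Int) (out : Int) : Prop := out = getCntUntilIdx_alt idx n dp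
instance (idx : Int) (n : Int) (dp : List Int) (out : Int) : Decidable (Spec_getCntUntilIdx idx n dp out) := by unfold Spec_getCntUntilIdx; infer_instance

-- ===== CLAIM (what is proved, stated in full; the proofs are below) =====
def Claim_equal_getCntUntilIdx : Prop := ∀ (idx : Int) (n : Int) (dp : List Int), Dom_getCntUntilIdx idx n dp → Pre_getCntUntilIdx idx n dp → Spec_getCntUntilIdx idx n dp (getCntUntilIdx idx n dp)

-- ===== LEMMAS AND PROOFS =====

-- loop invariant: with enough fuel and n >= 1 (idx in 0..4 when n = 1), the loop adds A's recursive count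
theorem cantorLoop_eq (f : Nat) : ∀ (idx : Int) (m : Int) (dp : List Int) (result : Int),
    m.toNat < f → 1 ≤ m → (m = 1 → 0 ≤ idx ∧ idx ≤ 4) →
    cantorLoopF f idx m dp result = result + getCntUntilIdxF f idx m dp := by
  induction f with
  | zero => intro idx m dp result hm h1 _; omega
  | succ k ih =>
    intro idx m dp result hm h1 htab
    by_cases h2 : m > 1
    · have hm1 : ¬ m < 0 := by omega
      have hm0 : ¬ m = 0 := by omega
      have hmne1 : ¬ m = 1 := by omega
      rw [cantorLoopF, getCntUntilIdxF]
      simp only [h2, if_true, hm1, hm0, if_false, hmne1, false_and]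
      have hpow : (0 : Int) < 5 ^ (m - 1).toNat := by positivity
      have hrem0 : 0 ≤ PySem.Int.mod idx (5 ^ (m - 1).toNat) := PySem.Int.mod_nonneg _ hpow
      have hremlt : PySem.Int.mod idx (5 ^ (m - 1).toNat) < 5 ^ (m - 1).toNat :=
        PySem.Int.mod_lt _ hpow
      have htab' : m - 1 = 1 → 0 ≤ PySem.Int.mod idx (5 ^ (m - 1).toNat) ∧
          PySem.Int.mod idx (5 ^ (m - 1).toNat) ≤ 4 := by
        intro h
        have ht : (m - 1).toNat = 1 := by omega
        rw [ht] at hremlt hrem0 ⊢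
        norm_num at hremlt hrem0 ⊢
        omega
      have hrec := ih (PySem.Int.mod idx (5 ^ (m - 1).toNat)) (m - 1) dp
      split_ifs with hA hB hC <;> try omega
      all_goals first
        | (rw [hA]; ring)
        | (rw [hrec _ (by omega) (by omega) htab']; ring)
    · have hm1 : m = 1 := by omega
      obtain ⟨hi0, hi4⟩ := htab hm1
      subst hm1
      rw [cantorLoopF]
      simp only [gt_iff_lt, lt_irrefl, if_false]
      interval_cases idx <;> simp [getCntUntilIdxF]

-- ===== VERDICT (by name: the statement is the Claim_ definition above) =====
theorem getCntUntilIdx_spec : Claim_equal_getCntUntilIdx := by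
  intro idx n dp _ hpre
  unfold Spec_getCntUntilIdx getCntUntilIdx_alt getCntUntilIdx
  by_cases hneg : n < 0
  · rw [getCntUntilIdxF]; simp [hneg]
  · by_cases h0 : n = 0
    · rw [getCntUntilIdxF]; simp [h0]
    · simp only [hneg, if_false, h0, if_false]
      have h1 : 1 ≤ n := by omega
      have htab : n = 1 → 0 ≤ idx ∧ idx ≤ 4 := by
        intro hn1
        rcases hpre with h | ⟨_, h⟩ | ⟨h, _⟩
        · omega
        · exact h
        · omega
      rw [cantorLoop_eq (n.toNat + 1) idx n dp 0 (by omega) h1 htab]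
      ring
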